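-- pv_equiv track=rewrite | github.com/Mushinako/ICEC-CSULB2-2019 | Practice/2017 Regional/03-8180/sol8180.py | star_arrangements
-- ===== SOURCE A (Python) =====
-- from math import floor, sqrt
--
-- def divisor(n):
--     # Ignore 1 and itself
--     d = [i for i in range(2, floor(sqrt(n)) + 1) if not n % i]
--     all_d = d + [n // x for x in d]
--     return sorted(list(set(all_d)))
--
-- def star_arrangements(s):
--     res = []
--     # Find all divisors
--     divs = divisor(s)
--     res += [(x, x) for x in divs]
--     # For all odd divisors, split into 2 lines
--     res += [(x // 2 + 1, x // 2) for x in (divs + [s]) if x % 2]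
--     # For odd number of rows...
--     res += [(x + 1, x)
--             for x in range(1, s // 3 + 1) if not (s + x) % (2 * x + 1)]
--     return sorted(list(set(res)))
-- ===== SOURCE B (Python) =====
-- from math import isqrt
--
--
-- def star_arrangements(s):
--     pairs = set()
--     # rectangular arrangements: one per nontrivial divisor of s,
--     # found by trial division up to sqrt(s)
--     for i in range(2, isqrt(s) + 1):
--         if s % i == 0:
--             for d in (i, s // i):
--                 pairs.add((d, d))
--                 if d % 2:
--                     pairs.add((d // 2 + 1, d // 2))
--     if s % 2:
--         pairs.add((s // 2 + 1, s // 2))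
--     # two-row-size arrangements with rows of x+1 and x stars: such an x
--     # works exactly when 2*x+1 divides 2*s-1, so enumerate the divisors
--     # of 2*s-1 by trial division instead of scanning every x up to s//3
--     if s > 0:
--         m = 2 * s - 1
--         for i in range(1, isqrt(m) + 1):
--             if m % i == 0:
--                 for d in (i, m // i):
--                     x = d // 2
--                     if 1 <= x <= s // 3:
--                         pairs.add((x + 1, x))
--     return sorted(pairs)
-- ===== Notes on version B (the rewrite author's own statement) =====
-- stated objective: faster
-- what changed: Replaces A's O(s) scan of every candidate row count x in 1..s//3 by O(sqrt(s)) trial-division enumeration of the divisors of 2*s-1 (valid x are exactly those with 2*x+1 | 2*s-1), and builds all pairs in one set instead of three list comprehensions over a separately sorted divisor list; Pre_ excludes s < 0, where A raises ValueError (math.sqrt of a negative).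
import Mathlib
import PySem

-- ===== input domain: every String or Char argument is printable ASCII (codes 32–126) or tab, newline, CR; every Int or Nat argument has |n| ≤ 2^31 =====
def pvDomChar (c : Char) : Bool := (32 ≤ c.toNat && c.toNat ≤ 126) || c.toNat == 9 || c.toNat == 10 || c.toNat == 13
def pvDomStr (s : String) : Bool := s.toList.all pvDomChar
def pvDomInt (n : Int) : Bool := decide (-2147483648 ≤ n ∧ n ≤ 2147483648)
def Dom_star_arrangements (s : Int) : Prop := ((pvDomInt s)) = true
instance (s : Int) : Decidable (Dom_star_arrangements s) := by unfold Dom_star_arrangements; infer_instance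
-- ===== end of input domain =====

-- B replaces A's O(s) scan of row counts x in 1..s//3 by an O(√s) enumeration of the
-- divisors of 2*s-1 (valid x ⟺ 2*x+1 ∣ 2*s-1), collecting all pairs in one set.

-- ===== PORT A =====
-- floor(sqrt(n)) (and math.isqrt(n)) for a float-exact argument: exact for 0 ≤ n ≤ 2^31,
-- the domain Dom_star_arrangements admits (Python's correctly-rounded double sqrt never
-- crosses an integer below 2^52).
def pyISqrt (n : Int) : Int := ((Nat.sqrt n.toNat : Nat) : Int)

def divisor (n : Int) : List Int :=
  let d := (PySem.List.pyRange 2 (pyISqrt n + 1)).filter (fun i => PySem.Int.mod n i == 0)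
  let all_d := d ++ d.map (fun x => PySem.Int.floordiv n x)
  PySem.List.sorted (PySem.Set.ofList all_d) (fun x => x) false

def star_arrangements (s : Int) : List (Int × Int) :=
  let res : List (Int × Int) := []
  let divs := divisor s
  let res := res ++ divs.map (fun x => (x, x))
  let res := res ++ ((divs ++ [s]).filter (fun x => PySem.Int.mod x 2 != 0)).map
      (fun x => (PySem.Int.floordiv x 2 + 1, PySem.Int.floordiv x 2))
  let res := res ++ ((PySem.List.pyRange 1 (PySem.Int.floordiv s 3 + 1)).filter
      (fun x => PySem.Int.mod (s + x) (2 * x + 1) == 0)).map (fun x => (x + 1, x))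
  PySem.List.sorted2 (PySem.Set.ofList res) Prod.fst Prod.snd false

-- ===== PORT B =====
def star_arrangements_alt (s : Int) : List (Int × Int) :=
  let pairs : PySem.Set (Int × Int) := PySem.Set.empty
  let pairs := (PySem.List.pyRange 2 (pyISqrt s + 1)).foldl (fun acc i =>
      if PySem.Int.mod s i == 0 then
        ([i, PySem.Int.floordiv s i] : List Int).foldl (fun acc2 d =>
          let acc2 := PySem.Set.add acc2 (d, d)
          if PySem.Int.mod d 2 != 0 then
            PySem.Set.add acc2 (PySem.Int.floordiv d 2 + 1, PySem.Int.floordiv d 2)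
          else acc2) acc
      else acc) pairs
  let pairs := if PySem.Int.mod s 2 != 0 then
      PySem.Set.add pairs (PySem.Int.floordiv s 2 + 1, PySem.Int.floordiv s 2)
    else pairs
  let pairs := if s > 0 then
      let m := 2 * s - 1
      (PySem.List.pyRange 1 (pyISqrt m + 1)).foldl (fun acc i =>
        if PySem.Int.mod m i == 0 then
          ([i, PySem.Int.floordiv m i] : List Int).foldl (fun acc2 d =>
            let x := PySem.Int.floordiv d 2
            if 1 ≤ x ∧ x ≤ PySem.Int.floordiv s 3 then PySem.Set.add acc2 (x + 1, x)
            else acc2) acc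
        else acc) pairs
    else pairs
  PySem.List.sorted2 pairs Prod.fst Prod.snd false

-- ===== PRECONDITION & SPEC =====
-- Pre_ excludes s < 0, where A raises ValueError (math.sqrt of a negative argument).
def Pre_star_arrangements (s : Int) : Prop := 0 ≤ s
instance (s : Int) : Decidable (Pre_star_arrangements s) := by unfold Pre_star_arrangements; infer_instance
def pvWitness_star_arrangements : Int := (9)
def Spec_star_arrangements (s : Int) (out : List (Int × Int)) : Prop := out = star_arrangements_alt s
instance (s : Int) (out : List (Int × Int)) : Decidable (Spec_star_arrangements s out) := by unfold Spec_star_arrangements; infer_instance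

-- ===== CLAIM (what is proved, stated in full; the proofs are below) =====
def Claim_equal_star_arrangements : Prop := ∀ (s : Int), Dom_star_arrangements s → Pre_star_arrangements s → Spec_star_arrangements s (star_arrangements s)

-- ===== LEMMAS AND PROOFS =====

-- the (non-strict) lexicographic order sorted2 with keys fst/snd produces on Int pairs
def lexLe (a b : Int × Int) : Prop := a.1 < b.1 ∨ (a.1 = b.1 ∧ a.2 ≤ b.2)

lemma pairwise_insertBy_lex (x : Int × Int) :
    ∀ (acc : List (Int × Int)), acc.Pairwise lexLe →
    (PySem.List.insertBy
      (fun a b => decide (a.1 < b.1) || (!decide (b.1 < a.1) && decide (a.2 < b.2)))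
      x acc).Pairwise lexLe := by
  intro acc
  induction acc with
  | nil => intro _; simp [PySem.List.insertBy]
  | cons y ys ih =>
    intro hp
    rw [List.pairwise_cons] at hp
    obtain ⟨hy, hys⟩ := hp
    by_cases hb : (decide (x.1 < y.1) || (!decide (y.1 < x.1) && decide (x.2 < y.2))) = true
    · rw [PySem.List.insertBy, if_pos hb]
      have hxy : lexLe x y := by
        simp only [Bool.or_eq_true, Bool.and_eq_true, Bool.not_eq_true', decide_eq_true_eq,
          decide_eq_false_iff_not] at hb
        unfold lexLe; omega
      refine List.Pairwise.cons ?_ (List.Pairwise.cons hy hys)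
      intro z hz
      rcases List.mem_cons.mp hz with rfl | hz'
      · exact hxy
      · have := hy z hz'
        unfold lexLe at *; omega
    · rw [PySem.List.insertBy, if_neg hb]
      refine List.Pairwise.cons ?_ (ih hys)
      intro z hz
      rw [PySem.List.mem_insertBy] at hz
      rcases hz with rfl | hz
      · simp only [Bool.or_eq_true, Bool.and_eq_true, Bool.not_eq_true', decide_eq_true_eq,
          decide_eq_false_iff_not, not_or, not_and] at hb
        unfold lexLe; omega
      · exact hy z hz

lemma sorted2_pairwise_le (xs : List (Int × Int)) :
    (PySem.List.sorted2 xs Prod.fst Prod.snd false).Pairwise lexLe := by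
  rw [PySem.List.sorted2]
  simp only [if_neg (by simp : ¬ (false = true))]
  induction xs using List.reverseRecOn with
  | nil => simp
  | append_singleton t x ih =>
    rw [List.foldl_append, List.foldl_cons, List.foldl_nil]
    exact pairwise_insertBy_lex x _ ih

lemma sorted2_congr_perm {xs ys : List (Int × Int)} (h : xs.Perm ys) :
    PySem.List.sorted2 xs Prod.fst Prod.snd false
      = PySem.List.sorted2 ys Prod.fst Prod.snd false := by
  have hperm : (PySem.List.sorted2 xs Prod.fst Prod.snd false).Perm
      (PySem.List.sorted2 ys Prod.fst Prod.snd false) :=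
    ((PySem.List.sorted2_perm xs Prod.fst Prod.snd false).trans h).trans
      (PySem.List.sorted2_perm ys Prod.fst Prod.snd false).symm
  refine hperm.eq_of_pairwise ?_ (sorted2_pairwise_le xs) (sorted2_pairwise_le ys)
  intro a b _ _ hab hba
  unfold lexLe at hab hba
  have : a.1 = b.1 ∧ a.2 = b.2 := by omega
  exact Prod.ext this.1 this.2

lemma pyISqrt_spec (n : Int) (h : 0 ≤ n) :
    pyISqrt n * pyISqrt n ≤ n ∧ n < (pyISqrt n + 1) * (pyISqrt n + 1) := by
  unfold pyISqrt
  obtain ⟨m, rfl⟩ := Int.eq_ofNat_of_zero_le h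
  constructor
  · have h1 := Nat.sqrt_le' m
    have : (m.sqrt * m.sqrt : Nat) ≤ m := by nlinarith [h1]
    exact_mod_cast this
  · have h2 := Nat.lt_succ_sqrt' m
    have : (m : Nat) < (m.sqrt + 1) * (m.sqrt + 1) := by nlinarith [h2]
    exact_mod_cast this

lemma pyISqrt_nonneg (n : Int) : 0 ≤ pyISqrt n := by
  unfold pyISqrt; positivity

lemma div_scan (m d : Int) (hm : 1 ≤ m) (hd : 1 ≤ d) (hdvd : d ∣ m) :
    ∃ i, 1 ≤ i ∧ i ≤ pyISqrt m ∧ i ∣ m ∧ (d = i ∨ d = m / i) := by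
  obtain ⟨hsq1, hsq2⟩ := pyISqrt_spec m (by omega)
  by_cases hle : d ≤ pyISqrt m
  · exact ⟨d, hd, hle, hdvd, Or.inl rfl⟩
  · obtain ⟨k, hk⟩ := hdvd
    have hdm : d ≤ m := Int.le_of_dvd (by omega) ⟨k, hk⟩
    have hk1 : 1 ≤ k := by nlinarith
    have hmd : m / d = k := by rw [hk, Int.mul_ediv_cancel_left _ (by omega : d ≠ 0)]
    refine ⟨k, hk1, ?_, ⟨d, by linarith [hk, mul_comm d k]⟩, Or.inr ?_⟩
    · -- k ≤ pyISqrt m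
      nlinarith [pyISqrt_nonneg m]
    · -- d = m / k
      rw [hk, mul_comm, Int.mul_ediv_cancel_left _ (by omega : k ≠ 0)]

lemma div_scan_back (m i : Int) (hm : 1 ≤ m) (hi : 1 ≤ i) (_hsq : i ≤ pyISqrt m)
    (hdvd : i ∣ m) : (1 ≤ m / i ∧ m / i ∣ m) := by
  obtain ⟨hsq1, hsq2⟩ := pyISqrt_spec m (by omega)
  obtain ⟨k, hk⟩ := hdvd
  have hmi : m / i = k := by rw [hk, Int.mul_ediv_cancel_left _ (by omega : i ≠ 0)]
  constructor
  · rw [hmi]; nlinarith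
  · rw [hmi]; exact ⟨i, by linarith [hk, mul_comm i k]⟩

lemma row_dvd_iff (s x : Int) : (2 * x + 1) ∣ (s + x) ↔ (2 * x + 1) ∣ (2 * s - 1) := by
  constructor
  · intro h
    have h2 : (2 * x + 1) ∣ 2 * (s + x) := h.mul_left 2
    have : (2 * s - 1) = 2 * (s + x) - (2 * x + 1) := by ring
    rw [this]
    exact dvd_sub h2 dvd_rfl
  · intro h
    have h2 : (2 * x + 1) ∣ 2 * (s + x) := by
      have : 2 * (s + x) = (2 * s - 1) + (2 * x + 1) := by ring
      rw [this]; exact dvd_add h dvd_rfl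
    obtain ⟨k, hk⟩ := h2
    have hke : (2 : Int) ∣ k := by
      rcases Int.even_or_odd k with he | ho
      · exact he.two_dvd
      · exfalso
        have : Odd ((2 * x + 1) * k) := (Int.odd_iff.mpr (by omega)).mul ho
        rw [← hk] at this
        exact (Int.not_odd_iff_even.mpr ⟨s + x, by ring⟩) this
    obtain ⟨j, rfl⟩ := hke
    refine ⟨j, ?_⟩
    have : 2 * (s + x) = 2 * ((2 * x + 1) * j) := by rw [hk]; ring
    omega

-- generic: membership in a foldl that only ever appends/adds elements
lemma mem_foldl_or {α β : Type} (f : List β → α → List β) (Q : α → β → Prop) (p : β) :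
    ∀ (l : List α), (∀ acc i, i ∈ l → (p ∈ f acc i ↔ p ∈ acc ∨ Q i p)) →
    ∀ init, p ∈ l.foldl f init ↔ p ∈ init ∨ ∃ i ∈ l, Q i p := by
  intro l
  induction l with
  | nil => simp
  | cons a t ih =>
    intro h init
    have := ih (fun acc i hi => h acc i (List.mem_cons_of_mem a hi)) (f init a)
    rw [List.foldl_cons, this, h init a (List.mem_cons_self)]
    simp only [List.mem_cons]
    constructor
    · rintro ((h1 | h2) | ⟨i, hi, hq⟩)
      · exact Or.inl h1
      · exact Or.inr ⟨a, Or.inl rfl, h2⟩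
      · exact Or.inr ⟨i, Or.inr hi, hq⟩
    · rintro (h1 | ⟨i, (rfl | hi), hq⟩)
      · exact Or.inl (Or.inl h1)
      · exact Or.inl (Or.inr hq)
      · exact Or.inr ⟨i, hi, hq⟩

lemma nodup_foldl {α β : Type} (f : List β → α → List β)
    (h : ∀ acc i, (acc : List β).Nodup → (f acc i).Nodup) :
    ∀ (l : List α) (init : List β), init.Nodup → (l.foldl f init).Nodup := by
  intro l
  induction l with
  | nil => intro init hi; simpa using hi
  | cons a t ih => intro init hi; exact ih (f init a) (h init a hi)

-- what membership in A's divisor list means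
lemma mem_divisor (n x : Int) : x ∈ divisor n ↔
    ∃ i, (2 ≤ i ∧ i < pyISqrt n + 1) ∧ PySem.Int.mod n i = 0 ∧
      (x = i ∨ x = PySem.Int.floordiv n i) := by
  unfold divisor
  simp only [PySem.List.mem_sorted, PySem.Set.mem_ofList, List.mem_append, List.mem_map,
    List.mem_filter, PySem.List.mem_pyRange_one, beq_iff_eq]
  constructor
  · rintro (⟨hr, hm⟩ | ⟨i, ⟨hr, hm⟩, rfl⟩)
    · exact ⟨x, hr, hm, Or.inl rfl⟩
    · exact ⟨i, hr, hm, Or.inr rfl⟩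
  · rintro ⟨i, hr, hm, (rfl | rfl)⟩
    · exact Or.inl ⟨hr, hm⟩
    · exact Or.inr ⟨i, ⟨hr, hm⟩, rfl⟩

-- A's third comprehension agrees with B's divisor scan of 2*s-1
lemma third_iff (s : Int) (hs : 0 ≤ s) (p : Int × Int) :
    (∃ x, (1 ≤ x ∧ x < PySem.Int.floordiv s 3 + 1) ∧
        PySem.Int.mod (s + x) (2 * x + 1) = 0 ∧ p = (x + 1, x)) ↔
    (0 < s ∧ ∃ i, (1 ≤ i ∧ i < pyISqrt (2 * s - 1) + 1) ∧
        PySem.Int.mod (2 * s - 1) i = 0 ∧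
        ∃ d, (d = i ∨ d = PySem.Int.floordiv (2 * s - 1) i) ∧
          1 ≤ PySem.Int.floordiv d 2 ∧ PySem.Int.floordiv d 2 ≤ PySem.Int.floordiv s 3 ∧
          p = (PySem.Int.floordiv d 2 + 1, PySem.Int.floordiv d 2)) := by
  have h3 : PySem.Int.floordiv s 3 = s / 3 := PySem.Int.floordiv_eq_ediv_of_pos (by norm_num)
  constructor
  · rintro ⟨x, ⟨hx1, hx2⟩, hmod, rfl⟩
    rw [PySem.Int.mod_eq_zero_iff_dvd] at hmod
    rw [h3] at hx2
    have hs3 : 3 ≤ s := by omega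
    have hm1 : (1 : Int) ≤ 2 * s - 1 := by omega
    have hdvd : (2 * x + 1) ∣ (2 * s - 1) := (row_dvd_iff s x).mp hmod
    obtain ⟨i, hi1, hi2, hidvd, hd⟩ := div_scan (2 * s - 1) (2 * x + 1) hm1 (by omega) hdvd
    have hfi : PySem.Int.floordiv (2 * s - 1) i = (2 * s - 1) / i :=
      PySem.Int.floordiv_eq_ediv_of_pos (by omega)
    refine ⟨by omega, i, ⟨hi1, by omega⟩, by rw [PySem.Int.mod_eq_zero_iff_dvd]; exact hidvd,
      2 * x + 1, by rw [hfi]; exact hd, ?_⟩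
    have hq : PySem.Int.floordiv (2 * x + 1) 2 = x := by
      rw [PySem.Int.floordiv_eq_ediv_of_pos (by norm_num : (0:Int) < 2)]; omega
    rw [hq, h3]
    exact ⟨by omega, by omega, rfl⟩
  · rintro ⟨hs0, i, ⟨hi1, hi2⟩, hmod, d, hd, hx1, hx2, rfl⟩
    rw [PySem.Int.mod_eq_zero_iff_dvd] at hmod
    have hm1 : (1 : Int) ≤ 2 * s - 1 := by omega
    have hdd : d ∣ (2 * s - 1) ∧ 1 ≤ d := by
      rcases hd with rfl | rfl
      · exact ⟨hmod, hi1⟩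
      · rw [PySem.Int.floordiv_eq_ediv_of_pos (by omega : (0:Int) < i)]
        have := div_scan_back (2 * s - 1) i hm1 hi1 (by omega) hmod
        exact ⟨this.2, this.1⟩
    have hodd : ¬ ((2 : Int) ∣ d) := by
      intro h2
      have : (2 : Int) ∣ (2 * s - 1) := dvd_trans h2 hdd.1
      omega
    have hd2 : PySem.Int.floordiv d 2 = d / 2 := PySem.Int.floordiv_eq_ediv_of_pos (by norm_num)
    rw [hd2] at hx1 hx2 ⊢
    rw [h3] at hx2
    have hdx : d = 2 * (d / 2) + 1 := by omega
    refine ⟨d / 2, ⟨hx1, by rw [h3]; omega⟩, ?_, rfl⟩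
    rw [PySem.Int.mod_eq_zero_iff_dvd]
    apply (row_dvd_iff s (d / 2)).mpr
    rw [← hdx]
    exact hdd.1


-- membership in B's first (divisor) loop
lemma memB1 (s : Int) (p : Int × Int) (init : PySem.Set (Int × Int)) :
    p ∈ List.foldl
        (fun acc i =>
          if (PySem.Int.mod s i == 0) = true then
            List.foldl
              (fun acc2 d =>
                if (PySem.Int.mod d 2 != 0) = true then
                  (acc2.add (d, d)).add (PySem.Int.floordiv d 2 + 1, PySem.Int.floordiv d 2)
                else acc2.add (d, d))
              acc [i, PySem.Int.floordiv s i]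
          else acc)
        init (PySem.List.pyRange 2 (pyISqrt s + 1)) ↔
      p ∈ init ∨ ∃ i, (2 ≤ i ∧ i < pyISqrt s + 1) ∧ PySem.Int.mod s i = 0 ∧
        ∃ d, (d = i ∨ d = PySem.Int.floordiv s i) ∧
          (p = (d, d) ∨ (PySem.Int.mod d 2 ≠ 0 ∧
            p = (PySem.Int.floordiv d 2 + 1, PySem.Int.floordiv d 2))) := by
  rw [mem_foldl_or _
      (fun i p => PySem.Int.mod s i = 0 ∧
        ∃ d, (d = i ∨ d = PySem.Int.floordiv s i) ∧
          (p = (d, d) ∨ (PySem.Int.mod d 2 ≠ 0 ∧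
            p = (PySem.Int.floordiv d 2 + 1, PySem.Int.floordiv d 2)))) p _ ?_ init]
  · simp only [PySem.List.mem_pyRange_one]
  · intro acc i _
    by_cases hm : (PySem.Int.mod s i == 0) = true
    · rw [if_pos hm, beq_iff_eq] at *
      simp only [List.foldl_cons, List.foldl_nil]
      have step : ∀ (a : PySem.Set (Int × Int)) (d : Int),
          p ∈ (if (PySem.Int.mod d 2 != 0) = true then
              (a.add (d, d)).add (PySem.Int.floordiv d 2 + 1, PySem.Int.floordiv d 2)
            else a.add (d, d)) ↔
          p ∈ a ∨ (p = (d, d) ∨ (PySem.Int.mod d 2 ≠ 0 ∧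
            p = (PySem.Int.floordiv d 2 + 1, PySem.Int.floordiv d 2))) := by
        intro a d
        split_ifs with h
        · rw [bne_iff_ne] at h
          simp only [PySem.Set.mem_add]
          tauto
        · rw [bne_iff_ne, not_ne_iff] at h
          simp only [PySem.Set.mem_add]
          constructor
          · rintro (h1 | h2)
            · exact Or.inl h1
            · exact Or.inr (Or.inl h2)
          · rintro (h1 | h2 | ⟨hne, _⟩)
            · exact Or.inl h1
            · exact Or.inr h2
            · exact absurd h hne
      rw [step, step]
      constructor
      · rintro ((h1 | h2) | h3)
        · exact Or.inl h1
        · exact Or.inr ⟨hm, i, Or.inl rfl, h2⟩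
        · exact Or.inr ⟨hm, _, Or.inr rfl, h3⟩
      · rintro (h1 | ⟨_, d, (rfl | rfl), hr⟩)
        · exact Or.inl (Or.inl h1)
        · exact Or.inl (Or.inr hr)
        · exact Or.inr hr
    · rw [if_neg hm]
      rw [beq_iff_eq] at hm
      constructor
      · exact fun h => Or.inl h
      · rintro (h | ⟨hmod, _⟩)
        · exact h
        · exact absurd hmod hm

-- membership in B's second (row-count) loop
lemma memB3 (s : Int) (p : Int × Int) (init : PySem.Set (Int × Int)) :
    p ∈ List.foldl
        (fun acc i =>
          if (PySem.Int.mod (2 * s - 1) i == 0) = true then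
            List.foldl
              (fun acc2 d =>
                if 1 ≤ PySem.Int.floordiv d 2 ∧ PySem.Int.floordiv d 2 ≤ PySem.Int.floordiv s 3 then
                  acc2.add (PySem.Int.floordiv d 2 + 1, PySem.Int.floordiv d 2)
                else acc2)
              acc [i, PySem.Int.floordiv (2 * s - 1) i]
          else acc)
        init (PySem.List.pyRange 1 (pyISqrt (2 * s - 1) + 1)) ↔
      p ∈ init ∨ ∃ i, (1 ≤ i ∧ i < pyISqrt (2 * s - 1) + 1) ∧
        PySem.Int.mod (2 * s - 1) i = 0 ∧
        ∃ d, (d = i ∨ d = PySem.Int.floordiv (2 * s - 1) i) ∧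
          1 ≤ PySem.Int.floordiv d 2 ∧ PySem.Int.floordiv d 2 ≤ PySem.Int.floordiv s 3 ∧
          p = (PySem.Int.floordiv d 2 + 1, PySem.Int.floordiv d 2) := by
  rw [mem_foldl_or _
      (fun i p => PySem.Int.mod (2 * s - 1) i = 0 ∧
        ∃ d, (d = i ∨ d = PySem.Int.floordiv (2 * s - 1) i) ∧
          1 ≤ PySem.Int.floordiv d 2 ∧ PySem.Int.floordiv d 2 ≤ PySem.Int.floordiv s 3 ∧
          p = (PySem.Int.floordiv d 2 + 1, PySem.Int.floordiv d 2)) p _ ?_ init]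
  · simp only [PySem.List.mem_pyRange_one]
  · intro acc i _
    by_cases hm : (PySem.Int.mod (2 * s - 1) i == 0) = true
    · rw [if_pos hm, beq_iff_eq] at *
      simp only [List.foldl_cons, List.foldl_nil]
      have step : ∀ (a : PySem.Set (Int × Int)) (d : Int),
          p ∈ (if 1 ≤ PySem.Int.floordiv d 2 ∧ PySem.Int.floordiv d 2 ≤ PySem.Int.floordiv s 3 then
              a.add (PySem.Int.floordiv d 2 + 1, PySem.Int.floordiv d 2)
            else a) ↔
          p ∈ a ∨ (1 ≤ PySem.Int.floordiv d 2 ∧ PySem.Int.floordiv d 2 ≤ PySem.Int.floordiv s 3 ∧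
            p = (PySem.Int.floordiv d 2 + 1, PySem.Int.floordiv d 2)) := by
        intro a d
        split_ifs with h
        · simp only [PySem.Set.mem_add]
          tauto
        · rw [not_and_or] at h
          constructor
          · exact fun hh => Or.inl hh
          · rintro (hh | ⟨h1, h2, _⟩)
            · exact hh
            · rcases h with h | h
              · exact absurd h1 h
              · exact absurd h2 h
      rw [step, step]
      constructor
      · rintro ((h1 | h2) | h3)
        · exact Or.inl h1
        · exact Or.inr ⟨hm, i, Or.inl rfl, h2⟩
        · exact Or.inr ⟨hm, _, Or.inr rfl, h3⟩
      · rintro (h1 | ⟨_, d, (rfl | rfl), hr⟩)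
        · exact Or.inl (Or.inl h1)
        · exact Or.inl (Or.inr hr)
        · exact Or.inr hr
    · rw [if_neg hm]
      rw [beq_iff_eq] at hm
      constructor
      · exact fun h => Or.inl h
      · rintro (h | ⟨hmod, _⟩)
        · exact h
        · exact absurd hmod hm

-- A's collected list and B's set have the same members
lemma memA (s : Int) (p : Int × Int) :
    p ∈ PySem.Set.ofList
        ([] ++ List.map (fun x => (x, x)) (divisor s) ++
            List.map (fun x => (PySem.Int.floordiv x 2 + 1, PySem.Int.floordiv x 2))
              (List.filter (fun x => PySem.Int.mod x 2 != 0) (divisor s ++ [s])) ++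
          List.map (fun x => (x + 1, x))
            (List.filter (fun x => PySem.Int.mod (s + x) (2 * x + 1) == 0)
              (PySem.List.pyRange 1 (PySem.Int.floordiv s 3 + 1)))) ↔
      (∃ x, x ∈ divisor s ∧ p = (x, x)) ∨
        ((∃ x, (x ∈ divisor s ∨ x = s) ∧ PySem.Int.mod x 2 ≠ 0 ∧
            p = (PySem.Int.floordiv x 2 + 1, PySem.Int.floordiv x 2)) ∨
          (∃ x, (1 ≤ x ∧ x < PySem.Int.floordiv s 3 + 1) ∧
            PySem.Int.mod (s + x) (2 * x + 1) = 0 ∧ p = (x + 1, x))) := by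
  simp only [PySem.Set.mem_ofList, List.nil_append, List.mem_append, List.mem_map,
    List.mem_filter, PySem.List.mem_pyRange_one, bne_iff_ne, beq_iff_eq, ne_eq,
    List.mem_singleton]
  constructor
  · rintro ((⟨x, hx, rfl⟩ | ⟨x, ⟨hx, ho⟩, rfl⟩) | ⟨x, ⟨hr, hm⟩, rfl⟩)
    · exact Or.inl ⟨x, hx, rfl⟩
    · exact Or.inr (Or.inl ⟨x, hx, ho, rfl⟩)
    · exact Or.inr (Or.inr ⟨x, hr, hm, rfl⟩)
  · rintro (⟨x, hx, rfl⟩ | ⟨x, hx, ho, rfl⟩ | ⟨x, hr, hm, rfl⟩)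
    · exact Or.inl (Or.inl ⟨x, hx, rfl⟩)
    · exact Or.inl (Or.inr ⟨x, ⟨hx, ho⟩, rfl⟩)
    · exact Or.inr ⟨x, ⟨hr, hm⟩, rfl⟩


lemma div_part (s : Int) (p : Int × Int) :
    ((∃ x, x ∈ divisor s ∧ p = (x, x)) ∨
      (∃ x, (x ∈ divisor s ∨ x = s) ∧ PySem.Int.mod x 2 ≠ 0 ∧
        p = (PySem.Int.floordiv x 2 + 1, PySem.Int.floordiv x 2))) ↔
    ((∃ i, (2 ≤ i ∧ i < pyISqrt s + 1) ∧ PySem.Int.mod s i = 0 ∧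
        ∃ d, (d = i ∨ d = PySem.Int.floordiv s i) ∧
          (p = (d, d) ∨ (PySem.Int.mod d 2 ≠ 0 ∧
            p = (PySem.Int.floordiv d 2 + 1, PySem.Int.floordiv d 2)))) ∨
      (PySem.Int.mod s 2 ≠ 0 ∧ p = (PySem.Int.floordiv s 2 + 1, PySem.Int.floordiv s 2))) := by
  constructor
  · rintro (⟨x, hx, rfl⟩ | ⟨x, (hx | rfl), ho, rfl⟩)
    · obtain ⟨i, hr, hm, hd⟩ := (mem_divisor s x).mp hx
      exact Or.inl ⟨i, hr, hm, x, hd, Or.inl rfl⟩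
    · obtain ⟨i, hr, hm, hd⟩ := (mem_divisor s x).mp hx
      exact Or.inl ⟨i, hr, hm, x, hd, Or.inr ⟨ho, rfl⟩⟩
    · exact Or.inr ⟨ho, rfl⟩
  · rintro (⟨i, hr, hm, d, hd, (rfl | ⟨ho, rfl⟩)⟩ | ⟨ho, rfl⟩)
    · exact Or.inl ⟨d, (mem_divisor s d).mpr ⟨i, hr, hm, hd⟩, rfl⟩
    · exact Or.inr ⟨d, Or.inl ((mem_divisor s d).mpr ⟨i, hr, hm, hd⟩), ho, rfl⟩
    · exact Or.inr ⟨s, Or.inr rfl, ho, rfl⟩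

-- ===== VERDICT (by name: the statement is the Claim_ definition above) =====
theorem star_arrangements_spec : Claim_equal_star_arrangements := by
  intro s _ hs
  unfold Spec_star_arrangements star_arrangements star_arrangements_alt
  dsimp only
  apply sorted2_congr_perm
  rw [List.perm_ext_iff_of_nodup (PySem.Set.nodup_ofList _) ?nodupB]
  case nodupB =>
    have hempty : List.Nodup (PySem.Set.empty (α := Int × Int)) := List.nodup_nil
    have h1 : List.Nodup (List.foldl
        (fun acc i =>
          if (PySem.Int.mod s i == 0) = true then
            List.foldl
              (fun acc2 d =>
                if (PySem.Int.mod d 2 != 0) = true then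
                  (PySem.Set.add (PySem.Set.add acc2 (d, d))) (PySem.Int.floordiv d 2 + 1, PySem.Int.floordiv d 2)
                else PySem.Set.add acc2 (d, d))
              acc [i, PySem.Int.floordiv s i]
          else acc)
        PySem.Set.empty (PySem.List.pyRange 2 (pyISqrt s + 1))) := by
      refine nodup_foldl _ ?_ _ _ hempty
      intro acc i hn
      simp only [List.foldl_cons, List.foldl_nil]
      split_ifs <;>
        first
          | exact hn
          | (repeat' apply PySem.Set.nodup_add) <;> exact hn
    split_ifs with hpos hodd hodd
    · refine nodup_foldl _ ?_ _ _ ?_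
      · intro acc i hn
        simp only [List.foldl_cons, List.foldl_nil]
        split_ifs <;>
          first
            | exact hn
            | (repeat' apply PySem.Set.nodup_add) <;> exact hn
      · exact PySem.Set.nodup_add _ _ h1
    · refine nodup_foldl _ ?_ _ _ ?_
      · intro acc i hn
        simp only [List.foldl_cons, List.foldl_nil]
        split_ifs <;>
          first
            | exact hn
            | (repeat' apply PySem.Set.nodup_add) <;> exact hn
      · exact h1
    · exact PySem.Set.nodup_add _ _ h1
    · exact h1
  intro p
  rw [memA, ← or_assoc, div_part s p, third_iff s hs p]
  by_cases h0 : s > 0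
  · rw [if_pos h0, memB3]
    by_cases h2 : (PySem.Int.mod s 2 != 0) = true
    · rw [if_pos h2, PySem.Set.mem_add, memB1]
      rw [bne_iff_ne] at h2
      simp only [PySem.Set.empty, List.not_mem_nil, false_or]
      constructor
      · rintro ((hb | ⟨_, hm⟩) | ⟨_, ht⟩)
        · exact Or.inl (Or.inl hb)
        · exact Or.inl (Or.inr hm)
        · exact Or.inr ht
      · rintro ((hb | hm) | ht)
        · exact Or.inl (Or.inl hb)
        · exact Or.inl (Or.inr ⟨h2, hm⟩)
        · exact Or.inr ⟨h0, ht⟩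
    · rw [if_neg h2, memB1]
      rw [bne_iff_ne, not_ne_iff] at h2
      simp only [PySem.Set.empty, List.not_mem_nil, false_or]
      constructor
      · rintro ((hb | ⟨ho, _⟩) | ⟨_, ht⟩)
        · exact Or.inl hb
        · exact absurd h2 ho
        · exact Or.inr ht
      · rintro (hb | ht)
        · exact Or.inl (Or.inl hb)
        · exact Or.inr ⟨h0, ht⟩
  · rw [if_neg h0]
    by_cases h2 : (PySem.Int.mod s 2 != 0) = true
    · rw [if_pos h2, PySem.Set.mem_add, memB1]
      rw [bne_iff_ne] at h2
      simp only [PySem.Set.empty, List.not_mem_nil, false_or]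
      constructor
      · rintro ((hb | ⟨_, hm⟩) | ⟨hp0, _⟩)
        · exact Or.inl hb
        · exact Or.inr hm
        · exact absurd hp0 h0
      · rintro (hb | hm)
        · exact Or.inl (Or.inl hb)
        · exact Or.inl (Or.inr ⟨h2, hm⟩)
    · rw [if_neg h2, memB1]
      rw [bne_iff_ne, not_ne_iff] at h2
      simp only [PySem.Set.empty, List.not_mem_nil, false_or]
      constructor
      · rintro ((hb | ⟨ho, _⟩) | ⟨hp0, _⟩)
        · exact hb
        · exact absurd h2 ho
        · exact absurd hp0 h0
      · exact fun hb => Or.inl (Or.inl hb)
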